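-- pv_equiv track=rewrite | github.com/Eython/LeetCode | comparatorValue.py | comparatorValue
-- ===== SOURCE A (Python) =====
-- def comparatorValue(a:list,b:list,d:int) -> int:
--     comparator_value = 0
--
--     b = sorted(b)
--     last_index = len(b) - 1
--
--     for num_a in a:
--
--         if num_a < b[0]:
--             min_abs_diff = b[0] - num_a
--         elif num_a > b[-1]:
--             min_abs_diff = num_a - b[-1]
--         else:
--             left = 0
--             right = last_index
--
--             while 1:
--                 ix = int(left + (right - left) / 2)
--                 if b[ix] > num_a:
--                     right -= int((right - left) / 2)
--                 else:
--                     if b[ix+1] < num_a: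
--                         left += int((right - left) / 2)
--                     else:
--                         min_abs_diff = min(b[ix+1] - num_a,num_a - b[ix])
--                         break
--
--         if min_abs_diff > d:
--             comparator_value += 1
--
--     return comparator_value
-- ===== SOURCE B (Python) =====
-- def comparatorValue(a: list, b: list, d: int) -> int:
--     comparator_value = 0
--     for num_a in a:
--         best = abs(num_a - b[0])
--         for x in b:
--             dist = abs(num_a - x)
--             if dist < best:
--                 best = dist
--         if best > d:
--             comparator_value += 1
--     return comparator_value
-- ===== Notes on version B (the rewrite author's own statement) =====
-- stated objective: simpler
-- what changed: Drops the sort and the hand-rolled binary search entirely: for each element of a, B computes its minimum absolute distance to b by a plain linear scan initialised with abs(num_a - b[0]), then counts those whose distance exceeds d.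
-- crash fix: On a one-element b whose element occurs in a, A raises IndexError (b[ix+1] reads past the end inside the binary search) while B returns the count obtained with that element's distance 0. — e.g. on comparatorValue([5], [5], 0): A raises IndexError, B returns 0
import Mathlib
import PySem

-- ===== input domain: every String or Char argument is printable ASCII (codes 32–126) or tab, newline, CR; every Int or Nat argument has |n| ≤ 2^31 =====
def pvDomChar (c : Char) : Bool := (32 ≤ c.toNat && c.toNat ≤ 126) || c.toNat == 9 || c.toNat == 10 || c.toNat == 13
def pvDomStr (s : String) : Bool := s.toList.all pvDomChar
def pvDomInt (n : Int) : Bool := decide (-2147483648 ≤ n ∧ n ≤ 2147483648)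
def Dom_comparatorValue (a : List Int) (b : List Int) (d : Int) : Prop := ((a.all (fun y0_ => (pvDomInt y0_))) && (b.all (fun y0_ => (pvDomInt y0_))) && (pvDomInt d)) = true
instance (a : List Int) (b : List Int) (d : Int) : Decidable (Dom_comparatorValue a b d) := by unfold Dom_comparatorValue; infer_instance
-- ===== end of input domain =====

-- B replaces A's sort + hand-rolled binary search by a direct linear minimum-distance scan per
-- element (simpler, not faster); equivalence is about the return value only.

-- ===== PORT A =====
-- A's 'while 1' binary search, as fuel recursion. Fuel exhaustion (returning 0), the Nat
-- subtractions and the getD defaults are unreachable on inputs admitted by Pre_ (proved by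
-- pvSearchA_spec below); int(left + (right-left)/2) is exact Nat floor division here since
-- 0 ≤ left ≤ right < len b on every reached state.
def pvSearchA (b : List Int) (x : Int) : Nat → Nat → Nat → Int
  | _, _, 0 => 0
  | left, right, f + 1 =>
    let ix := left + (right - left) / 2
    if b.getD ix 0 > x then
      pvSearchA b x left (right - (right - left) / 2) f
    else if b.getD (ix + 1) 0 < x then
      pvSearchA b x (left + (right - left) / 2) right f
    else
      min (b.getD (ix + 1) 0 - x) (x - b.getD ix 0)

-- body of A's for-loop: min_abs_diff for num_a (b here is already sorted and, under Pre_,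
-- non-empty; b[-1] is b.getD (b.length - 1) 0 for non-empty b)
def pvMinDiffA (b : List Int) (x : Int) : Int :=
  if x < b.getD 0 0 then b.getD 0 0 - x
  else if x > b.getD (b.length - 1) 0 then x - b.getD (b.length - 1) 0
  else pvSearchA b x 0 (b.length - 1) (b.length + 1)

def comparatorValue (a : List Int) (b : List Int) (d : Int) : Int :=
  let bs := PySem.List.sorted b id
  List.foldl (fun acc num_a => if pvMinDiffA bs num_a > d then acc + 1 else acc) 0 a

-- ===== PORT B =====
-- B's inner scan: best = abs(x - b[0]); for y in b: if abs(x - y) < best: best = abs(x - y)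
-- (b[0] is b.headI for non-empty b; empty b with non-empty a raises in Python, excluded by Pre_)
def pvBestB (b : List Int) (x : Int) : Int :=
  List.foldl (fun best y => if |x - y| < best then |x - y| else best) |x - b.headI| b

def comparatorValue_alt (a : List Int) (b : List Int) (d : Int) : Int :=
  List.foldl (fun cnt num_a => if pvBestB b num_a > d then cnt + 1 else cnt) 0 a

-- ===== PRECONDITION & SPEC =====
-- Pre_ excludes exactly the inputs where A raises IndexError: empty b with non-empty a (b[0]),
-- and a one-element b whose element occurs in a (b[ix+1] past the end inside the binary search).
def Pre_comparatorValue (a : List Int) (b : List Int) (d : Int) : Prop :=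
  (a = [] ∨ b ≠ []) ∧ ¬ (b.length = 1 ∧ b.headI ∈ a)
instance (a : List Int) (b : List Int) (d : Int) : Decidable (Pre_comparatorValue a b d) := by
  unfold Pre_comparatorValue; infer_instance
def pvWitness_comparatorValue : List Int × List Int × Int := ([1, 10], [2, 8], 3)

-- On a one-element b whose element occurs in a, A raises IndexError while B returns the count
-- obtained with that element's distance 0.
def Raises_comparatorValue (a : List Int) (b : List Int) (d : Int) : Prop :=
  b.length = 1 ∧ b.headI ∈ a
instance (a : List Int) (b : List Int) (d : Int) : Decidable (Raises_comparatorValue a b d) := by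
  unfold Raises_comparatorValue; infer_instance
def pvRaiseWitness_comparatorValue : List Int × List Int × Int := ([5], [5], 0)
def pvRaiseWitnessOut_comparatorValue : Int := 0

def Spec_comparatorValue (a : List Int) (b : List Int) (d : Int) (out : Int) : Prop := out = comparatorValue_alt a b d
instance (a : List Int) (b : List Int) (d : Int) (out : Int) : Decidable (Spec_comparatorValue a b d out) := by unfold Spec_comparatorValue; infer_instance

-- ===== CLAIM (what is proved, stated in full; the proofs are below) =====
def Claim_equal_comparatorValue : Prop := ∀ (a : List Int) (b : List Int) (d : Int), Dom_comparatorValue a b d → Pre_comparatorValue a b d → Spec_comparatorValue a b d (comparatorValue a b d)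
def Claim_raises_comparatorValue : Prop := (∀ (a : List Int) (b : List Int) (d : Int), Dom_comparatorValue a b d → Raises_comparatorValue a b d → ¬ Pre_comparatorValue a b d) ∧ (Dom_comparatorValue (pvRaiseWitness_comparatorValue.1) (pvRaiseWitness_comparatorValue.2.1) (pvRaiseWitness_comparatorValue.2.2) ∧ Raises_comparatorValue (pvRaiseWitness_comparatorValue.1) (pvRaiseWitness_comparatorValue.2.1) (pvRaiseWitness_comparatorValue.2.2) ∧ comparatorValue_alt (pvRaiseWitness_comparatorValue.1) (pvRaiseWitness_comparatorValue.2.1) (pvRaiseWitness_comparatorValue.2.2) = pvRaiseWitnessOut_comparatorValue)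

-- ===== LEMMAS AND PROOFS =====

-- "v is the minimum distance from x to an element of b"
def IsMinDist (b : List Int) (x v : Int) : Prop :=
  (∃ y ∈ b, v = |x - y|) ∧ ∀ y ∈ b, v ≤ |x - y|

theorem isMinDist_unique {b : List Int} {x v w : Int}
    (hv : IsMinDist b x v) (hw : IsMinDist b x w) : v = w := by
  obtain ⟨⟨y, hy, hvy⟩, hvle⟩ := hv
  obtain ⟨⟨z, hz, hwz⟩, hwle⟩ := hw
  have h1 := hwle y hy
  have h2 := hvle z hz
  omega

theorem isMinDist_perm {b b' : List Int} {x v : Int}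
    (hp : b.Perm b') (hv : IsMinDist b x v) : IsMinDist b' x v := by
  obtain ⟨⟨y, hy, hvy⟩, hvle⟩ := hv
  exact ⟨⟨y, hp.mem_iff.mp hy, hvy⟩, fun z hz => hvle z (hp.mem_iff.mpr hz)⟩

theorem headI_eq_getD {b : List Int} (hb : b ≠ []) : b.headI = b.getD 0 0 := by
  cases b with
  | nil => exact absurd rfl hb
  | cons y t => rfl

theorem sorted_getD_mono {b : List Int} (hp : List.Pairwise (· ≤ ·) b)
    {i j : Nat} (hij : i ≤ j) (hj : j < b.length) : b.getD i 0 ≤ b.getD j 0 := by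
  rcases Nat.lt_or_eq_of_le hij with h | h
  · rw [List.getD_eq_getElem _ _ (Nat.lt_trans h hj), List.getD_eq_getElem _ _ hj]
    exact List.pairwise_iff_getElem.mp hp i j (Nat.lt_trans h hj) hj h
  · subst h; rfl

-- B's inner fold: its result is at most the init and at most every |x - y|, and is the init
-- or one of the |x - y|.
theorem foldl_min_aux (b : List Int) (x : Int) : ∀ init : Int,
    List.foldl (fun best y => if |x - y| < best then |x - y| else best) init b ≤ init
    ∧ (∀ y ∈ b, List.foldl (fun best y => if |x - y| < best then |x - y| else best) init b ≤ |x - y|)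
    ∧ (List.foldl (fun best y => if |x - y| < best then |x - y| else best) init b = init
        ∨ ∃ y ∈ b, List.foldl (fun best y => if |x - y| < best then |x - y| else best) init b = |x - y|) := by
  induction b with
  | nil => intro init; simp
  | cons z t ih =>
    intro init
    have hstep : (if |x - z| < init then |x - z| else init) ≤ init ∧
        (if |x - z| < init then |x - z| else init) ≤ |x - z| ∧
        ((if |x - z| < init then |x - z| else init) = init ∨
          (if |x - z| < init then |x - z| else init) = |x - z|) := by
      split_ifs with h <;> omega
    obtain ⟨h1, h2, h3⟩ := ih (if |x - z| < init then |x - z| else init)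
    refine ⟨le_trans h1 hstep.1, ?_, ?_⟩
    · intro y hy
      rcases List.mem_cons.mp hy with h | h
      · subst h; simpa using le_trans h1 hstep.2.1
      · simpa using h2 y h
    · rcases h3 with h | ⟨y, hy, h⟩
      · rcases hstep.2.2 with h' | h'
        · exact Or.inl (by simpa [h'] using h)
        · exact Or.inr ⟨z, List.mem_cons_self, by simpa [h'] using h⟩
      · exact Or.inr ⟨y, List.mem_cons_of_mem _ hy, by simpa using h⟩

theorem pvBestB_isMinDist {b : List Int} (hb : b ≠ []) (x : Int) :
    IsMinDist b x (pvBestB b x) := by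
  obtain ⟨h1, h2, h3⟩ := foldl_min_aux b x |x - b.headI|
  have hh : b.headI ∈ b := by
    cases b with
    | nil => exact absurd rfl hb
    | cons y t => exact List.mem_cons_self
  refine ⟨?_, h2⟩
  rcases h3 with h | h
  · exact ⟨b.headI, hh, h⟩
  · exact h

-- A's binary search: under the loop invariants it returns the bracketing-pair minimum.
theorem pvSearchA_spec : ∀ (f : Nat) (b : List Int) (x : Int) (l r : Nat),
    List.Pairwise (· ≤ ·) b → l < r → r < b.length →
    b.getD l 0 ≤ x → x ≤ b.getD r 0 → r - l < f →
    ∃ i, l ≤ i ∧ i + 1 ≤ r ∧ b.getD i 0 ≤ x ∧ x ≤ b.getD (i + 1) 0 ∧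
      pvSearchA b x l r f = min (b.getD (i + 1) 0 - x) (x - b.getD i 0) := by
  intro f
  induction f with
  | zero => intro b x l r _ _ _ _ _ hfuel; omega
  | succ f ih =>
    intro b x l r hp hlr hrlen hl hr hfuel
    by_cases h1 : b.getD (l + (r - l) / 2) 0 > x
    · -- left half: right -= (right-left)//2
      have hne : r - l ≠ 1 := by
        intro h
        have : l + (r - l) / 2 = l := by omega
        rw [this] at h1; omega
      have hgap : 2 ≤ r - l := by omega
      have hr' : x ≤ b.getD (r - (r - l) / 2) 0 := by
        have hmono : b.getD (l + (r - l) / 2) 0 ≤ b.getD (r - (r - l) / 2) 0 :=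
          sorted_getD_mono hp (by omega) (by omega)
        omega
      obtain ⟨i, hi1, hi2, hi3, hi4, hi5⟩ :=
        ih b x l (r - (r - l) / 2) hp (by omega) (by omega) hl hr' (by omega)
      refine ⟨i, hi1, by omega, hi3, hi4, ?_⟩
      rw [show pvSearchA b x l r (f + 1) = pvSearchA b x l (r - (r - l) / 2) f by
        simp only [pvSearchA]; rw [if_pos h1]]
      exact hi5
    · by_cases h2 : b.getD (l + (r - l) / 2 + 1) 0 < x
      · -- right half: left += (right-left)//2
        have hne : r - l ≠ 1 := by
          intro h
          have : l + (r - l) / 2 + 1 = r := by omega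
          rw [this] at h2; omega
        have hgap : 2 ≤ r - l := by omega
        obtain ⟨i, hi1, hi2, hi3, hi4, hi5⟩ :=
          ih b x (l + (r - l) / 2) r hp (by omega) hrlen (by omega) hr (by omega)
        refine ⟨i, by omega, hi2, hi3, hi4, ?_⟩
        rw [show pvSearchA b x l r (f + 1) = pvSearchA b x (l + (r - l) / 2) r f by
          simp only [pvSearchA]; rw [if_neg h1, if_pos h2]]
        exact hi5
      · -- bracketing pair found: break
        refine ⟨l + (r - l) / 2, by omega, by omega, by omega, by omega, ?_⟩
        simp only [pvSearchA]; rw [if_neg h1, if_neg h2]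

theorem pvMinDiffA_isMinDist {b : List Int} (hp : List.Pairwise (· ≤ ·) b) (hb : b ≠ [])
    (x : Int) (hx : b.length = 1 → x ≠ b.headI) : IsMinDist b x (pvMinDiffA b x) := by
  have hlen : 0 < b.length := List.length_pos_iff.mpr hb
  have hmem : ∀ {j : Nat}, j < b.length → b.getD j 0 ∈ b := by
    intro j hj
    rw [List.getD_eq_getElem _ _ hj]
    exact List.getElem_mem hj
  have hidx : ∀ y ∈ b, ∃ j : Nat, j < b.length ∧ b.getD j 0 = y := by
    intro y hy
    obtain ⟨j, hj, hyj⟩ := List.mem_iff_getElem.mp hy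
    exact ⟨j, hj, by rw [List.getD_eq_getElem _ _ hj]; exact hyj⟩
  unfold pvMinDiffA
  split_ifs with h1 h2
  · -- x < b[0]
    refine ⟨⟨b.getD 0 0, hmem hlen, ?_⟩, ?_⟩
    · rcases abs_choice (x - (b.getD 0 0)) with h | h <;>
        [skip; skip] <;> have := abs_nonneg (x - b.getD 0 0) <;> omega
    · intro y hy
      obtain ⟨j, hj, hyj⟩ := hidx y hy
      have := sorted_getD_mono hp (Nat.zero_le j) hj
      rcases abs_choice (x - y) with h | h <;> have := abs_nonneg (x - y) <;> omega
  · -- x > b[-1]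
    refine ⟨⟨b.getD (b.length - 1) 0, hmem (by omega), ?_⟩, ?_⟩
    · rcases abs_choice (x - (b.getD (b.length - 1)) 0) with h | h <;>
        have := abs_nonneg (x - b.getD (b.length - 1) 0) <;> omega
    · intro y hy
      obtain ⟨j, hj, hyj⟩ := hidx y hy
      have := sorted_getD_mono hp (by omega : j ≤ b.length - 1) (by omega)
      rcases abs_choice (x - y) with h | h <;> have := abs_nonneg (x - y) <;> omega
  · -- b[0] ≤ x ≤ b[-1]
    have hlen2 : 2 ≤ b.length := by
      by_contra h
      have h1' : b.length = 1 := by omega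
      have := hx h1'
      rw [headI_eq_getD hb] at this
      have : b.getD 0 0 = b.getD (b.length - 1) 0 := by rw [h1']
      omega
    obtain ⟨i, hi1, hi2, hi3, hi4, hi5⟩ :=
      pvSearchA_spec (b.length + 1) b x 0 (b.length - 1) hp (by omega) (by omega)
        (by omega) (by omega) (by omega)
    rw [hi5]
    constructor
    · rcases le_total (x - b.getD i 0) (b.getD (i + 1) 0 - x) with h | h
      · refine ⟨b.getD i 0, hmem (by omega), ?_⟩
        rw [min_eq_right h, abs_of_nonneg (by omega)]
      · refine ⟨b.getD (i + 1) 0, hmem (by omega), ?_⟩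
        rw [min_eq_left h, abs_of_nonpos (by omega)]
        ring
    · intro y hy
      obtain ⟨j, hj, hyj⟩ := hidx y hy
      have hm1 := min_le_left (b.getD (i + 1) 0 - x) (x - b.getD i 0)
      have hm2 := min_le_right (b.getD (i + 1) 0 - x) (x - b.getD i 0)
      rcases Nat.lt_or_ge j (i + 1) with hji | hji
      · have := sorted_getD_mono hp (by omega : j ≤ i) (by omega)
        rcases abs_choice (x - y) with h | h <;> have := abs_nonneg (x - y) <;> omega
      · have := sorted_getD_mono hp (hji : i + 1 ≤ j) hj
        rcases abs_choice (x - y) with h | h <;> have := abs_nonneg (x - y) <;> omega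

-- per-element agreement of the two loop bodies
theorem minDiff_eq_best {a b : List Int} (hb : b ≠ [])
    (hsing : ¬ (b.length = 1 ∧ b.headI ∈ a)) {x : Int} (hx : x ∈ a) :
    pvMinDiffA (PySem.List.sorted b id) x = pvBestB b x := by
  have hperm : (PySem.List.sorted b id).Perm b := PySem.List.sorted_perm b id false
  have hp : List.Pairwise (· ≤ ·) (PySem.List.sorted b id) :=
    PySem.List.sorted_pairwise b id
  have hbs : PySem.List.sorted b id ≠ [] := by
    intro h
    rw [h] at hperm
    exact hb hperm.symm.eq_nil
  have hsing' : (PySem.List.sorted b id).length = 1 → x ≠ (PySem.List.sorted b id).headI := by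
    intro hlen1
    have hblen : b.length = 1 := by rw [← hperm.length_eq]; exact hlen1
    obtain ⟨y, hy⟩ : ∃ y, b = [y] := List.length_eq_one_iff.mp hblen
    have hbs_eq : PySem.List.sorted b id = [y] := List.perm_singleton.mp (hy ▸ hperm)
    rw [hbs_eq]
    simp only [List.headI]
    intro hxy
    refine hsing ⟨hblen, ?_⟩
    rw [hy]
    simp only [List.headI]
    rw [← hxy]
    exact hx
  exact isMinDist_unique
    (isMinDist_perm hperm (pvMinDiffA_isMinDist hp hbs x hsing'))
    (pvBestB_isMinDist hb x)

-- ===== VERDICT (by name: the statement is the Claim_ definition above) =====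
theorem comparatorValue_spec : Claim_equal_comparatorValue := by
  intro a b d _ hpre
  obtain ⟨hab, hsing⟩ := hpre
  unfold Spec_comparatorValue comparatorValue comparatorValue_alt
  rcases hab with ha | hb
  · subst ha; rfl
  · exact PySem.List.foldl_congr_mem a _ _ 0
      (fun acc x hx => by rw [minDiff_eq_best hb hsing hx])

theorem comparatorValue_raises : Claim_raises_comparatorValue := by
  unfold Claim_raises_comparatorValue
  exact ⟨fun a b d _ hr hp => hp.2 hr, by decide⟩

-- self-check: the recorded raise-witness output is indeed B's value at the raise witness
theorem comparatorValue_raises_ok :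
    comparatorValue_alt pvRaiseWitness_comparatorValue.1 pvRaiseWitness_comparatorValue.2.1
      pvRaiseWitness_comparatorValue.2.2 = pvRaiseWitnessOut_comparatorValue := by
  have h := comparatorValue_raises
  unfold Claim_raises_comparatorValue at h
  exact h.2.2.2
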